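-- pv_equiv track=rewrite | github.com/cloudtools/tinyber | tinyber/ber.py | length_of_length
-- ===== SOURCE A (Python) =====
-- def length_of_length (n):
--     if n < 0x80:
--         return 1
--     else:
--         r = 1
--         while n:
--             n >>= 8
--             r += 1
--         return r
-- ===== SOURCE B (Python) =====
-- def length_of_length(n):
--     if n < 0x80:
--         return 1
--     return (n.bit_length() + 7) // 8 + 1
-- ===== Notes on version B (the rewrite author's own statement) =====
-- stated objective: idiomatic
-- what changed: Replaced the byte-shifting while loop with a closed-form computation from n.bit_length().
import Mathlib
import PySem

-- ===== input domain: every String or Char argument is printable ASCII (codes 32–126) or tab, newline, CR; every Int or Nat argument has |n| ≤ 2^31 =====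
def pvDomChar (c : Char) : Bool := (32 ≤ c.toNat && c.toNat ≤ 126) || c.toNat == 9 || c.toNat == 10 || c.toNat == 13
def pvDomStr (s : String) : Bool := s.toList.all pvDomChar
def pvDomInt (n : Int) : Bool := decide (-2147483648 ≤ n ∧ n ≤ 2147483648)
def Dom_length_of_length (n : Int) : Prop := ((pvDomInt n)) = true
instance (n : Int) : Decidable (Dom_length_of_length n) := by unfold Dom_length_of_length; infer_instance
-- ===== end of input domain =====

-- B replaces A's byte-shifting while loop with a closed form from the bit length (idiomatic).

-- ===== PORT A =====
-- the while loop; only reached with n ≥ 0x80, so state is a Nat ('n >>= 8' = division by 256)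
def lolLoop (m : Nat) (r : Int) : Int :=
  if m ≠ 0 then lolLoop (m / 256) (r + 1) else r
decreasing_by exact Nat.div_lt_self (Nat.pos_of_ne_zero (by assumption)) (by omega)

def length_of_length (n : Int) : Int :=
  if n < 0x80 then 1 else lolLoop n.toNat 1

-- ===== PORT B =====
-- n.bit_length() for n > 0 is Nat.log2 n + 1; '//' on nonnegatives is Nat division
def length_of_length_alt (n : Int) : Int :=
  if n < 0x80 then 1 else ((n.toNat.log2 + 1 + 7) / 8 : Nat) + 1

-- ===== PRECONDITION & SPEC =====
def Spec_length_of_length (n : Int) (out : Int) : Prop := out = length_of_length_alt n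
instance (n : Int) (out : Int) : Decidable (Spec_length_of_length n out) := by unfold Spec_length_of_length; infer_instance

-- ===== CLAIM (what is proved, stated in full; the proofs are below) =====
def Claim_equal_length_of_length : Prop := ∀ (n : Int), Dom_length_of_length n → Spec_length_of_length n (length_of_length n)

-- ===== LEMMAS AND PROOFS =====

theorem lolLoop_eq (m : Nat) : ∀ (r : Int), m ≠ 0 → lolLoop m r = r + (m.log2 / 8 : Nat) + 1 := by
  induction m using Nat.strong_induction_on with
  | _ m ih =>
    intro r hm
    rw [lolLoop, if_pos hm]
    by_cases h : m / 256 = 0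
    · rw [lolLoop, if_neg (by simpa using h)]
      have hlt : m < 256 := by
        rcases Nat.lt_or_ge m 256 with h' | h'
        · exact h'
        · exact absurd h (by omega)
      have hl8 : m.log2 < 8 := (Nat.log2_lt hm).mpr (by omega)
      have : m.log2 / 8 = 0 := Nat.div_eq_of_lt hl8
      simp [this]
    · have hlt : m / 256 < m := Nat.div_lt_self (Nat.pos_of_ne_zero hm) (by omega)
      rw [ih _ hlt _ h]
      have h256 : 256 ≤ m := by
        by_contra hc
        exact h (Nat.div_eq_of_lt (by omega))
      have hlog : m.log2 = (m / 256).log2 + 8 := by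
        have e : m / 256 = m / 2 / 2 / 2 / 2 / 2 / 2 / 2 / 2 := by omega
        have hge8 : 8 ≤ m.log2 := (Nat.le_log2 hm).mpr (by omega)
        have hd : Nat.log 2 (m / 256) = Nat.log 2 m - 8 := by
          rw [e, Nat.log_div_base, Nat.log_div_base, Nat.log_div_base, Nat.log_div_base,
              Nat.log_div_base, Nat.log_div_base, Nat.log_div_base, Nat.log_div_base]
          omega
        simp only [Nat.log2_eq_log_two] at *
        omega
      have hge : 8 ≤ m.log2 := by omega
      have : m.log2 / 8 = (m / 256).log2 / 8 + 1 := by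
        rw [hlog]; omega
      rw [this]
      push_cast
      ring

theorem length_of_length_spec : Claim_equal_length_of_length := by
  intro n _
  unfold Spec_length_of_length length_of_length length_of_length_alt
  by_cases h : n < 0x80
  · simp [h]
  · rw [if_neg h, if_neg h]
    have hm : n.toNat ≠ 0 := by
      have : (0x80 : Int) ≤ n := le_of_not_gt h
      omega
    rw [lolLoop_eq _ _ hm]
    have : (n.toNat.log2 + 1 + 7) / 8 = n.toNat.log2 / 8 + 1 := by omega
    rw [this]
    push_cast
    ring
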